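-- pv_equiv track=rewrite | github.com/dly2424/DST_Dedicated_Mod_Manager | DST_mod_manager.py | sequential
-- ===== SOURCE A (Python) =====
-- def sequential(lst):
--     length = len(lst)
--     if length == 0 or lst[0] != 0:
--         return False
--     for i in range(length):
--         if i + 1 < length:
--             if lst[i] + 1 != lst[i+1]:
--                 return False
--     return True
-- ===== SOURCE B (Python) =====
-- def sequential(lst):
--     return len(lst) > 0 and lst == list(range(len(lst)))
-- ===== Notes on version B (the rewrite author's own statement) =====
-- stated objective: simpler
-- what changed: Replaces the adjacency scan (lst[i]+1 == lst[i+1] with an explicit lst[0] check) by one whole-list equality against the generated reference list(range(len(lst)))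
import Mathlib
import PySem

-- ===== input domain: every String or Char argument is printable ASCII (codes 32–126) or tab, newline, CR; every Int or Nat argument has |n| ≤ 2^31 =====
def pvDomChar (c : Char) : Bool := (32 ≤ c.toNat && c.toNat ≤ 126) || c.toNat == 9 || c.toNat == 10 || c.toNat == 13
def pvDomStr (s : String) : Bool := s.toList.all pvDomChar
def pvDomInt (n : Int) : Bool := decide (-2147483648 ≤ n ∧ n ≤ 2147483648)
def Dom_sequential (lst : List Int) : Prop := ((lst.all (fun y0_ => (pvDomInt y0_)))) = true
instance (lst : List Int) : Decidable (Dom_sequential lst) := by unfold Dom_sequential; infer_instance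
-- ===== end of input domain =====

-- ===== PORT A =====
-- B compares lst against the generated reference list instead of A's adjacency scan; objective: simpler.
def sequential (lst : List Int) : Bool :=
  let length := lst.length
  if length == 0 || !((PySem.List.pyGet? lst 0) == some 0) then false
  else
    -- for i in range(length): if i+1<length and lst[i]+1 != lst[i+1]: return False
    (List.range length).all (fun i =>
      if i + 1 < length then
        (PySem.List.pyGetD lst (i : Int) 0 + 1 == PySem.List.pyGetD lst ((i : Int) + 1) 0)
      else true)

-- ===== PORT B =====
def sequential_alt (lst : List Int) : Bool :=
  decide (lst.length > 0) && (lst == (List.range lst.length).map Int.ofNat)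

-- ===== PRECONDITION & SPEC =====
def Spec_sequential (lst : List Int) (out : Bool) : Prop := out = sequential_alt lst
instance (lst : List Int) (out : Bool) : Decidable (Spec_sequential lst out) := by unfold Spec_sequential; infer_instance

-- ===== CLAIM (what is proved, stated in full; the proofs are below) =====
def Claim_equal_sequential : Prop := ∀ (lst : List Int), Dom_sequential lst → Spec_sequential lst (sequential lst)

-- ===== LEMMAS AND PROOFS =====

-- A's port returns true iff the list is nonempty, starts at 0, and is adjacent-increasing
lemma seqA_char (lst : List Int) : sequential lst = true ↔
    (lst ≠ [] ∧ lst[0]? = some 0 ∧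
      ∀ i : Nat, i + 1 < lst.length → lst[i]?.getD 0 + 1 = lst[i+1]?.getD 0) := by
  simp only [sequential, Bool.or_eq_true, beq_iff_eq, List.length_eq_zero_iff,
    Bool.not_eq_eq_eq_not, Bool.not_true, beq_eq_false_iff_ne, ne_eq,
    PySem.List.pyGetD_natCast, List.getD_eq_getElem?_getD, Bool.if_true_right,
    Bool.if_false_left, Bool.decide_or, decide_not, Bool.not_or, Bool.not_not,
    Bool.and_eq_true, decide_eq_false_iff_not, decide_eq_true_eq, List.all_eq_true,
    List.mem_range, not_lt, PySem.List.pyGet?_zero]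
  constructor
  · rintro ⟨⟨h1, h2⟩, h3⟩
    refine ⟨h1, h2, fun i hi => ?_⟩
    rcases h3 i (by omega) with h | h
    · omega
    · have hc : ((i : Int) + 1) = ((i + 1 : Nat) : Int) := by push_cast; ring
      rw [hc, PySem.List.pyGetD_natCast] at h
      simpa using h
  · rintro ⟨h1, h2, h3⟩
    refine ⟨⟨h1, h2⟩, fun i _ => ?_⟩
    by_cases hi : i + 1 < lst.length
    · right
      have hc : ((i : Int) + 1) = ((i + 1 : Nat) : Int) := by push_cast; ring
      rw [hc, PySem.List.pyGetD_natCast]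
      simpa using h3 i hi
    · left; omega

-- B's port returns true iff the list is nonempty and equals the reference list
lemma alt_char (lst : List Int) : sequential_alt lst = true ↔
    (0 < lst.length ∧ lst = (List.range lst.length).map Int.ofNat) := by
  simp only [sequential_alt, Bool.and_eq_true, decide_eq_true_eq, beq_iff_eq, gt_iff_lt]

-- the two characterisations coincide
lemma char_iff (lst : List Int) :
    (lst ≠ [] ∧ lst[0]? = some 0 ∧
      ∀ i : Nat, i + 1 < lst.length → lst[i]?.getD 0 + 1 = lst[i+1]?.getD 0)
    ↔ (0 < lst.length ∧ lst = (List.range lst.length).map Int.ofNat) := by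
  constructor
  · rintro ⟨h1, h2, h3⟩
    have hn : 0 < lst.length := List.length_pos_iff.mpr h1
    have key : ∀ i (hi : i < lst.length), lst[i] = (i : Int) := by
      intro i
      induction i with
      | zero =>
        intro hi
        rw [List.getElem?_eq_getElem hi] at h2
        simpa using h2
      | succ k ih =>
        intro hk1
        have hk : k < lst.length := by omega
        have h := h3 k (by omega)
        rw [List.getElem?_eq_getElem hk, List.getElem?_eq_getElem hk1] at h
        simp only [Option.getD_some] at h
        rw [ih hk] at h
        push_cast
        omega
    refine ⟨hn, List.ext_getElem (by simp) ?_⟩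
    intro i hi _
    rw [key i hi]
    simp
  · rintro ⟨hn, heq⟩
    refine ⟨by simpa [← List.length_pos_iff] using hn, ?_, ?_⟩
    · conv_lhs => rw [heq]
      rw [List.getElem?_eq_getElem (by simpa using hn)]
      simp
    · intro i hi
      conv_lhs => rw [heq]
      conv_rhs => rw [heq]
      rw [List.getElem?_eq_getElem (by simpa using (by omega : i < lst.length)),
        List.getElem?_eq_getElem (by simpa using hi)]
      simp only [List.getElem_map, List.getElem_range, Option.getD_some, Int.ofNat_eq_natCast]
      push_cast
      ring

lemma ports_agree (lst : List Int) : sequential lst = sequential_alt lst := by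
  rw [Bool.eq_iff_iff, seqA_char, alt_char]
  exact char_iff lst

-- ===== VERDICT (by name: the statement is the Claim_ definition above) =====
theorem sequential_spec : Claim_equal_sequential := by
  intro lst _
  unfold Spec_sequential
  exact ports_agree lst
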